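-- pv_equiv track=rewrite | github.com/diversecellar/basketPredictor | time-series_data-analysis.py | remove_qoutes
-- ===== SOURCE A (Python) =====
-- def remove_qoutes(str_name: str) -> str:
--     # removing brackets
--     while "'" in str_name:
--         str_name = str_name.replace("'","")
--     while "' " in str_name:
--         str_name = str_name.replace("' ","")
--     while " '" in str_name:
--         str_name = str_name.replace(" '","")
--     while " " in str_name:
--         str_name = str_name.replace(" ","")
--     while "\n" in str_name:
--         str_name = str_name.replace("\n","")
--     return str_name
-- ===== SOURCE B (Python) =====
-- def remove_qoutes(str_name: str) -> str:
--     # single linear pass: drop every quote, space and newline character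
--     return "".join(c for c in str_name if c not in "' \n")
-- ===== Notes on version B (the rewrite author's own statement) =====
-- stated objective: simpler
-- what changed: Replaces A's five sequential while-replace whole-string scans with one linear character-filtering pass over the string.
import Mathlib
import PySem

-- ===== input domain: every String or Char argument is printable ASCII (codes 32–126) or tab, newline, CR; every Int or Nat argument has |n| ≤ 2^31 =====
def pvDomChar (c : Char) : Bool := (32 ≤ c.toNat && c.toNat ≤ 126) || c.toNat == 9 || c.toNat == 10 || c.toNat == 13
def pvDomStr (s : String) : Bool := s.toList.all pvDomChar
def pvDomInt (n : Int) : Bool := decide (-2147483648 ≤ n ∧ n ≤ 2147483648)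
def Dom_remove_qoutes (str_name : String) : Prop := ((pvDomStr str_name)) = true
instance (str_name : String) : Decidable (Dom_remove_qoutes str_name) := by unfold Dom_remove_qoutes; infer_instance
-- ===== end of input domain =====

-- B replaces A's five while-replace whole-string scans by one character-filtering pass.

-- ===== PORT A =====
-- Each Python 'while' body executes at most once: str.replace(pat, "") removes every
-- occurrence of pat, and after the first loop no "'" remains so loops 2-3 never fire.
-- Hence each while-loop is exactly one guarded replace step (whileStep).
def whileStep (pat : String) (s : String) : String :=
  if PySem.Str.isIn pat s then PySem.Str.replace s pat "" else s

def remove_qoutes (str_name : String) : String :=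
  whileStep "\n" (whileStep " " (whileStep " '" (whileStep "' " (whileStep "'" str_name))))

-- ===== PORT B =====
def remove_qoutes_alt (str_name : String) : String :=
  String.ofList (str_name.toList.filter (fun c => !("' \n".toList.contains c)))

-- ===== PRECONDITION & SPEC =====
def Spec_remove_qoutes (str_name : String) (out : String) : Prop := out = remove_qoutes_alt str_name
instance (str_name : String) (out : String) : Decidable (Spec_remove_qoutes str_name out) := by unfold Spec_remove_qoutes; infer_instance

-- ===== CLAIM (what is proved, stated in full; the proofs are below) =====
def Claim_equal_remove_qoutes : Prop := ∀ (str_name : String), Dom_remove_qoutes str_name → Spec_remove_qoutes str_name (remove_qoutes str_name)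

-- ===== LEMMAS AND PROOFS =====

-- replace.go with a single-character pattern and empty replacement is a filter
lemma go_single (q : Char) : ∀ (fuel : Nat) (l acc : List Char), l.length ≤ fuel →
    PySem.Chars.replace.go [q] [] fuel l acc = acc.reverse ++ l.filter (fun c => !(c == q)) := by
  intro fuel
  induction fuel with
  | zero => intro l acc h; cases l <;> simp_all [PySem.Chars.replace.go]
  | succ n ih =>
    intro l acc h
    cases l with
    | nil => simp [PySem.Chars.replace.go]
    | cons c t =>
      have hlen : t.length ≤ n := by simpa using Nat.le_of_succ_le_succ h
      by_cases hc : q = c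
      · subst hc
        simp only [PySem.Chars.replace.go]
        rw [if_pos (by simp)]
        rw [ih _ _ (by simpa using hlen)]
        simp
      · simp only [PySem.Chars.replace.go]
        rw [if_neg (by simp [hc]), ih t _ hlen]
        simp [Ne.symm hc]

lemma replace_single (q : Char) (l : List Char) :
    PySem.Chars.replace l [q] [] = l.filter (fun c => !(c == q)) := by
  rw [PySem.Chars.replace]
  simp only [List.isEmpty, reduceCtorEq, if_false]
  simpa using go_single q l.length l [] le_rfl

lemma filter_eq_self_of_not_mem {l : List Char} {q : Char} (h : q ∉ l) :
    l.filter (fun c => !(c == q)) = l := by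
  apply List.filter_eq_self.2
  intro a ha
  simp only [Bool.not_eq_eq_eq_not, Bool.not_true, beq_eq_false_iff_ne]
  exact fun e => h (e ▸ ha)

lemma not_mem_filter_self (l : List Char) (q : Char) : q ∉ l.filter (fun c => !(c == q)) := by
  intro h
  have := List.of_mem_filter h
  simp at this

lemma whileStep_single (pat : String) (q : Char) (hp : pat.toList = [q]) (t : String) :
    (whileStep pat t).toList = t.toList.filter (fun c => !(c == q)) := by
  unfold whileStep
  by_cases h : PySem.Str.isIn pat t
  · rw [if_pos h, PySem.Str.toList_replace, hp]
    simpa using replace_single q t.toList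
  · rw [if_neg h]
    have hninf : ¬ pat.toList <:+: t.toList := by
      rw [← PySem.Str.isIn_iff_infix]; simpa using h
    rw [hp] at hninf
    have hq : q ∉ t.toList := by
      intro hm
      obtain ⟨u, v, huv⟩ := List.append_of_mem hm
      exact hninf ⟨u, v, by rw [huv]; simp⟩
    exact (filter_eq_self_of_not_mem hq).symm

lemma whileStep_skip (pat t : String) (h : ¬ pat.toList <:+: t.toList) : whileStep pat t = t := by
  unfold whileStep
  rw [if_neg (by rw [PySem.Str.isIn_iff_infix]; exact h)]

lemma pred_eq (c : Char) :
    (((!(c == '\n')) && (!(c == ' '))) && (!(c == '\''))) = (!("' \n".toList.contains c)) := by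
  have hl : "' \n".toList = ['\'', ' ', '\n'] := by decide
  rw [hl]
  by_cases h1 : c = '\'' <;> by_cases h2 : c = ' ' <;> by_cases h3 : c = '\n' <;>
    simp [h1, h2, h3]

theorem remove_qoutes_spec : Claim_equal_remove_qoutes := by
  intro s _
  unfold Spec_remove_qoutes remove_qoutes remove_qoutes_alt
  have h1 : (whileStep "'" s).toList = s.toList.filter (fun c => !(c == '\'')) :=
    whileStep_single "'" '\'' (by decide) s
  have hq : '\'' ∉ (whileStep "'" s).toList := by
    rw [h1]; exact not_mem_filter_self _ _
  have h2 : whileStep "' " (whileStep "'" s) = whileStep "'" s :=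
    whileStep_skip _ _ (fun hinf => hq (hinf.subset (by decide)))
  have h3 : whileStep " '" (whileStep "' " (whileStep "'" s)) = whileStep "'" s := by
    rw [h2]
    exact whileStep_skip _ _ (fun hinf => hq (hinf.subset (by decide)))
  rw [h3]
  have h4 := whileStep_single " " ' ' (by decide) (whileStep "'" s)
  have h5 := whileStep_single "\n" '\n' (by decide) (whileStep " " (whileStep "'" s))
  have hlist : (whileStep "\n" (whileStep " " (whileStep "'" s))).toList
      = s.toList.filter (fun c => !("' \n".toList.contains c)) := by
    rw [h5, h4, h1, List.filter_filter, List.filter_filter]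
    exact List.filter_congr (fun c _ => pred_eq c)
  calc whileStep "\n" (whileStep " " (whileStep "'" s))
      = String.ofList (whileStep "\n" (whileStep " " (whileStep "'" s))).toList := by
        rw [String.ofList_toList]
    _ = String.ofList (s.toList.filter (fun c => !("' \n".toList.contains c))) := by rw [hlist]
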